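-- pv_equiv track=rewrite | github.com/dkhmelenko/AoC-2022 | day_08/task.py | is_visible_down
-- ===== SOURCE A (Python) =====
-- def is_visible_down(i, j, matrix, curr):
--     if i >= len(matrix):
--         return True
--     visible = curr > matrix[i][j]
--     if visible:
--         return is_visible_down(i + 1, j, matrix, curr)
--     else:
--         return False
-- ===== SOURCE B (Python) =====
-- def is_visible_down(i, j, matrix, curr):
--     blocker = next((r for r in range(i, len(matrix)) if matrix[r][j] >= curr), None)
--     return blocker is None
-- ===== Notes on version B (the rewrite author's own statement) =====
-- stated objective: idiomatic
-- what changed: replaces the tail recursion with a search for the first blocking row (next() over range(i, len(matrix)) with matrix[r][j] >= curr), returning whether none was found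
import Mathlib
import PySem

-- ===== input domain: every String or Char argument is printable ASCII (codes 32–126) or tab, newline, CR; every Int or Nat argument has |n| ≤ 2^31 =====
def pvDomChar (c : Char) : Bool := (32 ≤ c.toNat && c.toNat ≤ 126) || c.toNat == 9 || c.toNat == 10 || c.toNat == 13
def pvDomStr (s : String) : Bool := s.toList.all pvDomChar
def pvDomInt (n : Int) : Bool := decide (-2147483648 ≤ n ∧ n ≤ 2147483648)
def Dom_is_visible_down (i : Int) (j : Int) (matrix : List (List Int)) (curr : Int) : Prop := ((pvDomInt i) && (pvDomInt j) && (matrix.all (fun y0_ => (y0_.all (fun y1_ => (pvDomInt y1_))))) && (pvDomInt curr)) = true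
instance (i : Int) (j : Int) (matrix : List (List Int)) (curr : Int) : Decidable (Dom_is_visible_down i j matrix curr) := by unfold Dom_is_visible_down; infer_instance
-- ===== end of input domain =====

-- B replaces A's tail recursion by a search for the first blocking row (next() over the
-- row range); equivalence of the return values is proved on Pre_ (exactly where A returns).

-- ===== PORT A =====
-- matrix[i][j] with Python's negative-index wraparound; none = IndexError (excluded by Pre_).
def pvCellA (matrix : List (List Int)) (r : Int) (j : Int) : Option Int :=
  (PySem.List.pyGet? matrix r).bind (fun row => PySem.List.pyGet? row j)

def is_visible_down (i : Int) (j : Int) (matrix : List (List Int)) (curr : Int) : Bool :=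
  if _h : i ≥ (matrix.length : Int) then true
  else
    match pvCellA matrix i j with
    | none => false   -- Python raises IndexError here; outside Pre_
    | some v =>
      if curr > v then is_visible_down (i + 1) j matrix curr else false
termination_by ((matrix.length : Int) - i).toNat
decreasing_by omega

-- ===== PORT B =====
-- next((r for r in range(i, len(matrix)) if matrix[r][j] >= curr), None) is None.
-- A missing cell matrix[r][j] raises in Python (outside Pre_); the port stops there too.
def is_visible_down_alt (i : Int) (j : Int) (matrix : List (List Int)) (curr : Int) : Bool :=
  ((PySem.List.pyRange i (matrix.length : Int) 1).find? (fun r =>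
      match (PySem.List.pyGet? matrix r).bind (fun row => PySem.List.pyGet? row j) with
      | none => true    -- IndexError point; outside Pre_
      | some v => v ≥ curr)).isNone

-- ===== PRECONDITION & SPEC =====
-- Pre_: exactly the inputs on which the Python A returns — the walk down from row i never
-- reaches a missing cell matrix[r][j] before being stopped: whenever every earlier visited
-- cell exists and is smaller than curr, the next cell must exist.
-- (the 'max i (-len)' only bounds the ranges so Pre_ is cheap to decide; under the first
-- conjunct it equals i, so nothing on which A returns is excluded)
def Pre_is_visible_down (i : Int) (j : Int) (matrix : List (List Int)) (curr : Int) : Prop :=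
  -(matrix.length : Int) ≤ i ∧
  ∀ r ∈ PySem.List.pyRange (max i (-(matrix.length : Int))) (matrix.length : Int) 1,
    (∀ r' ∈ PySem.List.pyRange (max i (-(matrix.length : Int))) r 1,
        ∃ v, pvCellA matrix r' j = some v ∧ curr > v) →
    (pvCellA matrix r j).isSome
instance (i : Int) (j : Int) (matrix : List (List Int)) (curr : Int) : Decidable (Pre_is_visible_down i j matrix curr) := by unfold Pre_is_visible_down; infer_instance

def pvWitness_is_visible_down : Int × Int × List (List Int) × Int := (0, 0, [[1, 2], [3, 4]], 5)

def Spec_is_visible_down (i : Int) (j : Int) (matrix : List (List Int)) (curr : Int) (out : Bool) : Prop := out = is_visible_down_alt i j matrix curr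
instance (i : Int) (j : Int) (matrix : List (List Int)) (curr : Int) (out : Bool) : Decidable (Spec_is_visible_down i j matrix curr out) := by unfold Spec_is_visible_down; infer_instance

-- ===== CLAIM (what is proved, stated in full; the proofs are below) =====
def Claim_equal_is_visible_down : Prop := ∀ (i : Int) (j : Int) (matrix : List (List Int)) (curr : Int), Dom_is_visible_down i j matrix curr → Pre_is_visible_down i j matrix curr → Spec_is_visible_down i j matrix curr (is_visible_down i j matrix curr)

-- ===== LEMMAS AND PROOFS =====

theorem is_visible_down_eq_alt (i : Int) (j : Int) (matrix : List (List Int)) (curr : Int)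
    (hpre : ∀ r ∈ PySem.List.pyRange i (matrix.length : Int) 1,
      (∀ r' ∈ PySem.List.pyRange i r 1, ∃ v, pvCellA matrix r' j = some v ∧ curr > v) →
      (pvCellA matrix r j).isSome) :
    is_visible_down i j matrix curr = is_visible_down_alt i j matrix curr := by
  by_cases h : i ≥ (matrix.length : Int)
  · rw [is_visible_down, is_visible_down_alt]
    simp [h, PySem.List.pyRange_one_eq_nil h]
  · push Not at h
    have hi : (pvCellA matrix i j).isSome := by
      apply hpre i (by rw [PySem.List.mem_pyRange_one]; omega)
      intro r' hr'
      rw [PySem.List.mem_pyRange_one] at hr'; omega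
    obtain ⟨v, hv⟩ := Option.isSome_iff_exists.mp hi
    rw [is_visible_down, is_visible_down_alt, PySem.List.pyRange_one_cons h]
    simp only [not_le.mpr h, dite_false, hv]
    have hcell : ((PySem.List.pyGet? matrix i).bind (fun row => PySem.List.pyGet? row j)) = some v := hv
    by_cases hc : curr > v
    · rw [List.find?_cons_of_neg]
      · have hpre' : ∀ r ∈ PySem.List.pyRange (i + 1) (matrix.length : Int) 1,
            (∀ r' ∈ PySem.List.pyRange (i + 1) r 1, ∃ v, pvCellA matrix r' j = some v ∧ curr > v) →
            (pvCellA matrix r j).isSome := by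
          intro r hr hprev
          apply hpre r (by rw [PySem.List.mem_pyRange_one] at hr ⊢; omega)
          intro r' hr'
          rw [PySem.List.mem_pyRange_one] at hr'
          by_cases hri : r' = i
          · exact ⟨v, by rw [hri]; exact ⟨hv, hc⟩⟩
          · exact hprev r' (by rw [PySem.List.mem_pyRange_one]; omega)
        have ih := is_visible_down_eq_alt (i + 1) j matrix curr hpre'
        rw [is_visible_down_alt] at ih
        simpa [hc] using ih
      · simp [hcell]; omega
    · rw [List.find?_cons_of_pos]
      · simp [hc]
      · simp [hcell]; omega
termination_by ((matrix.length : Int) - i).toNat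
decreasing_by omega

-- ===== VERDICT (by name: the statement is the Claim_ definition above) =====
theorem is_visible_down_spec : Claim_equal_is_visible_down := by
  intro i j matrix curr _ hpre
  obtain ⟨h1, h2⟩ := hpre
  simp only [max_eq_left h1] at h2
  exact is_visible_down_eq_alt i j matrix curr h2
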